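-- pv_equiv track=rewrite | github.com/HolyMolyFoley23/WordleFirstWord | best_wordle.py | yellows
-- ===== SOURCE A (Python) =====
-- from collections import Counter
--
-- def yellows(guess,solution):
--     sol_letters = Counter(solution)
--     data = ['.'] * 5
--
--     #Handle special case with green but no yellow
--     for gus,sol in zip(guess,solution):
--         if(gus == sol):
--             sol_letters[gus] -= 1
--
--     for i, (gus,sol) in enumerate(zip(guess,solution)):
--         if(gus != sol):
--             if(gus in sol_letters):
--                 if(sol_letters[gus] > 0):
--                     sol_letters[gus] -= 1
--                     data[i] = gus
--                 else:
--                     data[i] = str.upper(gus)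
--     return data
-- ===== SOURCE B (Python) =====
-- def yellows(guess, solution):
--     pairs = list(zip(guess, solution))
--     data = ['.'] * 5
--     for i, (g, s) in enumerate(pairs):
--         if g != s and g in solution:
--             rank = sum(1 for gg, ss in pairs[:i] if gg != ss and gg == g)
--             quota = solution.count(g) - sum(1 for gg, ss in pairs if gg == ss == g)
--             data[i] = g if rank < quota else g.upper()
--     return data
-- ===== Notes on version B (the rewrite author's own statement) =====
-- stated objective: alternative
-- what changed: Replaces A's mutable Counter that is pre-decremented for greens and then decremented while streaming over the guess by a stateless per-position closed formula: position i is yellow iff the number of earlier non-green occurrences of its letter is below the letter's quota (solution count minus green matches), gray iff the letter occurs in the solution but the quota is exhausted.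
import Mathlib
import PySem

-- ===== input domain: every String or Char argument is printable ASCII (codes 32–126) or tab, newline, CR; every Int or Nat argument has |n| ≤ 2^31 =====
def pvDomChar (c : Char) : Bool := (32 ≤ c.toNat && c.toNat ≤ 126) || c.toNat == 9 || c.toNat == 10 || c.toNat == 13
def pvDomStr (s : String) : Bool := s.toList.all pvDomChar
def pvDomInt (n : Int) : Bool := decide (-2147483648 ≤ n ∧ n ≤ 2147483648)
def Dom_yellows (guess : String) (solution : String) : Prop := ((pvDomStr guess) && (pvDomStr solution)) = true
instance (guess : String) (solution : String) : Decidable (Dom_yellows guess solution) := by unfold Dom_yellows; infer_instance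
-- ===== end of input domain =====

-- B replaces A's mutable-Counter streaming scan by a stateless per-position closed formula (rank/quota); objective: a genuinely different decomposition of the same cost.

-- ===== PORT A =====
-- data[i] = … : Python raises IndexError when i ≥ 5; those inputs are excluded by Pre_yellows
-- (List.set is a no-op out of range, never reached inside Pre_).  str.upper(c) on one char = upperChar.
def yellows (guess : String) (solution : String) : List String :=
  let z := guess.toList.zip solution.toList
  let sol0 : PySem.Dict Char Int := PySem.Dict.counter solution.toList
  let sol1 := z.foldl (fun d p => if p.1 = p.2 then d.modify p.1 0 (· - 1) else d) sol0
  let res := (PySem.List.enumerate z 0).foldl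
    (fun (st : PySem.Dict Char Int × List String) ip =>
      if ip.2.1 ≠ ip.2.2 then
        if st.1.contains ip.2.1 then
          if st.1.getD ip.2.1 0 > 0 then
            (st.1.modify ip.2.1 0 (· - 1), st.2.set ip.1.toNat (String.ofList [ip.2.1]))
          else
            (st.1, st.2.set ip.1.toNat (String.ofList [PySem.Chars.upperChar ip.2.1]))
        else st
      else st)
    (sol1, List.replicate 5 ".")
  res.2

-- ===== PORT B =====
-- pairs[:i] with 0 ≤ i is take i (PySem.List.slice_to_natCast); 'c in solution' for the
-- single char c is list membership; solution.count(c) for one char is List.count.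
def yellows_alt (guess : String) (solution : String) : List String :=
  let pairs := guess.toList.zip solution.toList
  (PySem.List.enumerate pairs 0).foldl
    (fun (data : List String) ip =>
      if ip.2.1 ≠ ip.2.2 ∧ ip.2.1 ∈ solution.toList then
        let rank : Int := ((pairs.take ip.1.toNat).countP (fun p => decide (p.1 ≠ p.2) && p.1 == ip.2.1) : Int)
        let quota : Int := (solution.toList.count ip.2.1 : Int) - (pairs.countP (fun p => p.1 == p.2 && p.1 == ip.2.1) : Int)
        data.set ip.1.toNat (if rank < quota then String.ofList [ip.2.1] else String.ofList [PySem.Chars.upperChar ip.2.1])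
      else data)
    (List.replicate 5 ".")

-- ===== PRECONDITION & SPEC =====
-- Pre_ excludes exactly the inputs on which A raises IndexError: a non-green guess letter that
-- occurs in the solution at zip position ≥ 5 (data has only 5 cells).
def Pre_yellows (guess : String) (solution : String) : Prop :=
  ∀ p ∈ (guess.toList.zip solution.toList).drop 5, p.1 ≠ p.2 → p.1 ∉ solution.toList
instance (guess : String) (solution : String) : Decidable (Pre_yellows guess solution) := by
  unfold Pre_yellows; infer_instance

def pvWitness_yellows : String × String := ("crane", "slate")

def Spec_yellows (guess : String) (solution : String) (out : List String) : Prop := out = yellows_alt guess solution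
instance (guess : String) (solution : String) (out : List String) : Decidable (Spec_yellows guess solution out) := by unfold Spec_yellows; infer_instance

-- ===== CLAIM (what is proved, stated in full; the proofs are below) =====
def Claim_equal_yellows : Prop := ∀ (guess : String) (solution : String), Dom_yellows guess solution → Pre_yellows guess solution → Spec_yellows guess solution (yellows guess solution)

-- ===== LEMMAS AND PROOFS =====

-- the second component of a zip is a sublist of the right list
lemma map_snd_zip_sublist {α β : Type} : ∀ (g : List α) (s : List β), ((g.zip s).map Prod.snd).Sublist s := by
  intro g s
  induction g generalizing s with
  | nil => simp
  | cons a g ih =>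
    cases s with
    | nil => simp
    | cons b s => simpa using (ih s).cons₂ b

-- quota is nonnegative: green matches of c never outnumber c's occurrences in the solution
lemma quota_nonneg (g s : List Char) (c : Char) :
    ((g.zip s).countP (fun p => p.1 == p.2 && p.1 == c) : Int) ≤ (s.count c : Int) := by
  have h1 : (g.zip s).countP (fun p => p.1 == p.2 && p.1 == c)
      ≤ (g.zip s).countP (fun p => p.2 == c) := by
    apply List.countP_mono_left
    intro p _ hp
    simp only [Bool.and_eq_true, beq_iff_eq] at hp ⊢
    exact hp.1.symm.trans hp.2
  have h2 : (g.zip s).countP (fun p => p.2 == c) = ((g.zip s).map Prod.snd).count c := by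
    simp [List.count, List.countP_map, Function.comp_def]
  have h4 : (g.zip s).countP (fun p => p.1 == p.2 && p.1 == c) ≤ s.count c :=
    le_trans h1 (by rw [h2]; exact (map_snd_zip_sublist g s).count_le c)
  exact_mod_cast h4

-- A's first loop: its effect on every lookup
lemma firstLoop_getD :
    ∀ (l : List (Char × Char)) (d : PySem.Dict Char Int) (c : Char),
    (l.foldl (fun d p => if p.1 = p.2 then d.modify p.1 0 (· - 1) else d) d).getD c 0
      = d.getD c 0 - (l.countP (fun p => p.1 == p.2 && p.1 == c) : Int) := by
  intro l
  induction l with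
  | nil => simp
  | cons p l ih =>
    intro d c
    by_cases hp : p.1 = p.2
    · simp only [List.foldl_cons, if_pos hp, ih, List.countP_cons, PySem.Dict.getD_modify]
      by_cases hc : c = p.1
      · subst hc; simp [hp]; omega
      · have hc2 : ¬ c = p.2 := by rw [← hp]; exact hc
        have hc3 : ¬ p.2 = c := fun h => hc2 h.symm
        simp [hp, hc2, hc3]
    · simp only [List.foldl_cons, if_neg hp, ih, List.countP_cons]
      simp [hp]

-- A's first loop: the key set is unchanged (it only touches letters of the solution)
lemma firstLoop_contains (sol : List Char) :
    ∀ (l : List (Char × Char)) (d : PySem.Dict Char Int),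
    (∀ p ∈ l, p.1 = p.2 → p.1 ∈ sol) →
    (∀ c, d.contains c = decide (c ∈ sol)) →
    ∀ c, (l.foldl (fun d p => if p.1 = p.2 then d.modify p.1 0 (· - 1) else d) d).contains c = decide (c ∈ sol) := by
  intro l
  induction l with
  | nil => intro d _ hd c; simpa using hd c
  | cons p l ih =>
    intro d hmem hd c
    rw [List.foldl_cons]
    refine ih _ (fun q hq => hmem q (List.mem_cons_of_mem _ hq)) ?_ c
    intro c'
    by_cases hp : p.1 = p.2
    · simp only [if_pos hp, PySem.Dict.contains_modify, hd c']
      by_cases hc : c' = p.1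
      · subst hc; simp [hmem p List.mem_cons_self hp]
      · simp [hc]
    · simp only [if_neg hp, hd c']

-- the main-loop correspondence: A's stateful scan and B's stateless scan build the same data,
-- from any position i whose counter state matches A's invariant
lemma scan_eq (sol : List Char) (z : List (Char × Char))
    (hz2 : ∀ p ∈ z, p.1 = p.2 → p.1 ∈ sol) :
    ∀ (t : List (Char × Char)) (i : ℕ) (d : PySem.Dict Char Int) (data : List String),
    z.drop i = t →
    (∀ c, d.contains c = decide (c ∈ sol)) →
    (∀ c, d.getD c 0
        = ((sol.count c : Int) - (z.countP (fun p => p.1 == p.2 && p.1 == c) : Int))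
          - min (((z.take i).countP (fun p => decide (p.1 ≠ p.2) && p.1 == c) : Int))
                ((sol.count c : Int) - (z.countP (fun p => p.1 == p.2 && p.1 == c) : Int))) →
    ((PySem.List.enumerate t (i : Int)).foldl
      (fun (st : PySem.Dict Char Int × List String) ip =>
        if ip.2.1 ≠ ip.2.2 then
          if st.1.contains ip.2.1 then
            if st.1.getD ip.2.1 0 > 0 then
              (st.1.modify ip.2.1 0 (· - 1), st.2.set ip.1.toNat (String.ofList [ip.2.1]))
            else
              (st.1, st.2.set ip.1.toNat (String.ofList [PySem.Chars.upperChar ip.2.1]))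
          else st
        else st) (d, data)).2
    = (PySem.List.enumerate t (i : Int)).foldl
      (fun (data : List String) ip =>
        if ip.2.1 ≠ ip.2.2 ∧ ip.2.1 ∈ sol then
          data.set ip.1.toNat
            (if (((z.take ip.1.toNat).countP (fun p => decide (p.1 ≠ p.2) && p.1 == ip.2.1) : Int)
                  < (sol.count ip.2.1 : Int) - (z.countP (fun p => p.1 == p.2 && p.1 == ip.2.1) : Int))
             then String.ofList [ip.2.1] else String.ofList [PySem.Chars.upperChar ip.2.1])
        else data) data := by
  intro t
  induction t with
  | nil => intro i d data _ _ _; simp [PySem.List.enumerate]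
  | cons p t ih =>
    intro i d data hdrop hcont hgetD
    have hzi : z[i]? = some p := by
      have := (List.getElem?_drop (xs := z) (i := i) (j := 0)).symm
      rw [hdrop] at this; simpa using this
    have hdrop' : z.drop (i + 1) = t := by
      rw [← List.drop_drop, hdrop]; rfl
    have htake : z.take (i + 1) = z.take i ++ [p] := by
      rw [List.take_add_one, hzi]; rfl
    have hcast : (i : Int) + 1 = ((i + 1 : ℕ) : Int) := by push_cast; ring
    rw [PySem.List.enumerate_cons, List.foldl_cons, List.foldl_cons, hcast]
    dsimp only
    by_cases hp : p.1 = p.2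
    · -- green: both sides skip
      have hne : ¬ (p.1 ≠ p.2) := by simpa using hp
      rw [if_neg hne, if_neg (fun h => hne h.1)]
      refine ih (i + 1) d data hdrop' hcont ?_
      intro c
      rw [hgetD c]
      have heq : (z.take (i+1)).countP (fun q => decide (q.1 ≠ q.2) && q.1 == c)
           = (z.take i).countP (fun q => decide (q.1 ≠ q.2) && q.1 == c) := by
        rw [htake, List.countP_append]; simp [hp]
      rw [heq]
    · by_cases hm : p.1 ∈ sol
      · -- non-green letter occurring in the solution: both sides write the same cell
        have hA : d.contains p.1 = true := by rw [hcont]; simpa using hm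
        have hQ := hgetD p.1
        have hBc : p.1 ≠ p.2 ∧ p.1 ∈ sol := ⟨hp, hm⟩
        rw [if_pos hp, if_pos hA, if_pos hBc]
        simp only [Int.toNat_natCast]
        by_cases hlt : (((z.take i).countP (fun q => decide (q.1 ≠ q.2) && q.1 == p.1) : Int))
            < (sol.count p.1 : Int) - (z.countP (fun q => q.1 == q.2 && q.1 == p.1) : Int)
        · -- yellow
          have hpos : d.getD p.1 0 > 0 := by rw [hQ]; omega
          rw [if_pos hpos, if_pos hlt]
          refine ih (i + 1) _ _ hdrop' ?_ ?_
          · intro c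
            rw [PySem.Dict.contains_modify, hcont c]
            by_cases hc : c = p.1
            · subst hc; simp [hm]
            · simp [hc]
          · intro c
            rw [PySem.Dict.getD_modify]
            by_cases hc : c = p.1
            · subst hc
              rw [if_pos rfl, hQ, htake, List.countP_append]
              have h1 : ([p].countP (fun q => decide (q.1 ≠ q.2) && q.1 == p.1)) = 1 := by
                simp [hp]
              rw [h1]
              push_cast
              omega
            · rw [if_neg hc, hgetD c, htake, List.countP_append]
              have hc2 : ¬ p.1 = c := fun h => hc h.symm
              have h0 : ([p].countP (fun q => decide (q.1 ≠ q.2) && q.1 == c)) = 0 := by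
                simp [hc2]
              rw [h0, Nat.add_zero]
        · -- gray
          have hpos : ¬ d.getD p.1 0 > 0 := by rw [hQ]; omega
          rw [if_neg hpos, if_neg hlt]
          refine ih (i + 1) d _ hdrop' hcont ?_
          intro c
          rw [hgetD c]
          by_cases hc : c = p.1
          · subst hc
            rw [htake, List.countP_append]
            have h1 : ([p].countP (fun q => decide (q.1 ≠ q.2) && q.1 == p.1)) = 1 := by
              simp [hp]
            rw [h1]
            push_cast
            omega
          · rw [htake, List.countP_append]
            have hc2 : ¬ p.1 = c := fun h => hc h.symm
            have h0 : ([p].countP (fun q => decide (q.1 ≠ q.2) && q.1 == c)) = 0 := by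
              simp [hc2]
            rw [h0, Nat.add_zero]
      · -- non-green letter absent from the solution: both sides skip
        have hA : d.contains p.1 = false := by rw [hcont]; simpa using hm
        have hA' : ¬ (d.contains p.1 = true) := by simp [hA]
        have hBn : ¬ (p.1 ≠ p.2 ∧ p.1 ∈ sol) := fun h => hm h.2
        rw [if_pos hp, if_neg hBn, if_neg hA']
        refine ih (i + 1) d data hdrop' hcont ?_
        intro c
        rw [hgetD c]
        by_cases hc : c = p.1
        · subst hc
          have hcnt : sol.count p.1 = 0 := List.count_eq_zero.mpr hm
          have hgr : z.countP (fun q => q.1 == q.2 && q.1 == p.1) = 0 := by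
            rw [List.countP_eq_zero]
            intro q hq hgq
            simp only [Bool.and_eq_true, beq_iff_eq] at hgq
            exact absurd (hgq.2 ▸ hz2 q hq hgq.1) hm
          rw [hcnt, hgr]
          push_cast
          omega
        · rw [htake, List.countP_append]
          have hc2 : ¬ p.1 = c := fun h => hc h.symm
          have h0 : ([p].countP (fun q => decide (q.1 ≠ q.2) && q.1 == c)) = 0 := by
            simp [hc2]
          rw [h0, Nat.add_zero]

-- ===== VERDICT (by name: the statement is the Claim_ definition above) =====
theorem yellows_spec : Claim_equal_yellows := by
  intro guess solution _ _
  show yellows guess solution = yellows_alt guess solution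
  have hz2 : ∀ p ∈ guess.toList.zip solution.toList, p.1 = p.2 → p.1 ∈ solution.toList := by
    intro p hp h
    exact h ▸ (List.of_mem_zip hp).2
  have hcont : ∀ c, ((guess.toList.zip solution.toList).foldl
      (fun d p => if p.1 = p.2 then d.modify p.1 0 (· - 1) else d)
      (PySem.Dict.counter solution.toList)).contains c = decide (c ∈ solution.toList) := by
    refine firstLoop_contains _ _ _ hz2 ?_
    intro c
    rw [PySem.Dict.contains_counter]
    by_cases h : c ∈ solution.toList <;> simp [h]
  have hgetD : ∀ c, ((guess.toList.zip solution.toList).foldl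
      (fun d p => if p.1 = p.2 then d.modify p.1 0 (· - 1) else d)
      (PySem.Dict.counter solution.toList)).getD c 0
      = ((solution.toList.count c : Int)
          - ((guess.toList.zip solution.toList).countP (fun p => p.1 == p.2 && p.1 == c) : Int))
        - min ((((guess.toList.zip solution.toList).take 0).countP
                  (fun p => decide (p.1 ≠ p.2) && p.1 == c) : Int))
              ((solution.toList.count c : Int)
                - ((guess.toList.zip solution.toList).countP (fun p => p.1 == p.2 && p.1 == c) : Int)) := by
    intro c
    rw [firstLoop_getD, PySem.Dict.getD_counter]
    have := quota_nonneg guess.toList solution.toList c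
    simp only [List.take_zero, List.countP_nil, Nat.cast_zero]
    omega
  have h := scan_eq solution.toList (guess.toList.zip solution.toList) hz2
    (guess.toList.zip solution.toList) 0
    ((guess.toList.zip solution.toList).foldl
      (fun d p => if p.1 = p.2 then d.modify p.1 0 (· - 1) else d)
      (PySem.Dict.counter solution.toList))
    (List.replicate 5 ".") rfl hcont hgetD
  simp only [Nat.cast_zero] at h
  unfold yellows yellows_alt
  exact h
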